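-- pv_equiv track=rewrite | github.com/matejvais/SudokuSolver | solver_functions.py | kontrola_radku
-- ===== SOURCE A (Python) =====
-- def kontrola_radku(reseni):
--     '''
--     Funkce zkontroluje, zda se v každém řádku nachází každé číslo právě jednou.
--     Vrací True, pokud ano, jinak False.
--     '''
--     chyby = 0
--     for radek in reseni:
--         cislo = 1
--         Radek = sorted(radek)
--         for i in Radek:
--             if i != cislo:
--                 chyby += 1
--             cislo += 1
--     if chyby > 0:
--         return False
--     else:
--         return True
-- ===== SOURCE B (Python) =====
-- def kontrola_radku(reseni):
--     return all(set(radek) == set(range(1, len(radek) + 1)) for radek in reseni)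
-- ===== Notes on version B (the rewrite author's own statement) =====
-- stated objective: simpler
-- what changed: Replaces the sort plus incrementing-counter mismatch count with a per-row set-equality test against set(range(1, len(radek)+1)) under all().
import Mathlib
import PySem

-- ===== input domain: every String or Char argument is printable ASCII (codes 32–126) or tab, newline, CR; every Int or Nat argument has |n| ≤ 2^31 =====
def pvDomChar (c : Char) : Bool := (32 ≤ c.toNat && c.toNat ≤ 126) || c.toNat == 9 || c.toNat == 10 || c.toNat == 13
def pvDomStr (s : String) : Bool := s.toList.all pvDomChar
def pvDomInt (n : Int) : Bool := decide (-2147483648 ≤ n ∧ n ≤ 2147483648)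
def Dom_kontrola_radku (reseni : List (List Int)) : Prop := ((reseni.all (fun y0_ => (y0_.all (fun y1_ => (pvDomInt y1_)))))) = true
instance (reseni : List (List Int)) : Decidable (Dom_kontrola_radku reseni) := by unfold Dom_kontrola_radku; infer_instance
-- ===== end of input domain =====

-- B replaces A's sort-and-count-mismatches pass by a set-equality test per row; objective: simpler.

-- ===== PORT A =====
def kontrola_radku (reseni : List (List Int)) : Bool :=
  let chyby := reseni.foldl (fun chyby radek =>
      let Radek := PySem.List.sorted radek (fun x => x) false
      (Radek.foldl (fun (st : Int × Int) i =>
          (if i ≠ st.2 then st.1 + 1 else st.1, st.2 + 1)) (chyby, 1)).1)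
    0
  if chyby > 0 then false else true

-- ===== PORT B =====
def kontrola_radku_alt (reseni : List (List Int)) : Bool :=
  reseni.all (fun radek =>
    PySem.Set.equal (PySem.Set.ofList radek)
      (PySem.Set.ofList (PySem.List.pyRange 1 ((radek.length : Int) + 1) 1)))

-- ===== PRECONDITION & SPEC =====
def Spec_kontrola_radku (reseni : List (List Int)) (out : Bool) : Prop := out = kontrola_radku_alt reseni
instance (reseni : List (List Int)) (out : Bool) : Decidable (Spec_kontrola_radku reseni out) := by unfold Spec_kontrola_radku; infer_instance

-- ===== CLAIM (what is proved, stated in full; the proofs are below) =====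
def Claim_equal_kontrola_radku : Prop := ∀ (reseni : List (List Int)), Dom_kontrola_radku reseni → Spec_kontrola_radku reseni (kontrola_radku reseni)

-- ===== LEMMAS AND PROOFS =====

-- the inner-loop step of A
def pvStep (st : Int × Int) (i : Int) : Int × Int :=
  (if i ≠ st.2 then st.1 + 1 else st.1, st.2 + 1)

-- A's inner loop never decreases the error count
theorem pvInner_mono : ∀ (L : List Int) (c k : Int), c ≤ (L.foldl pvStep (c, k)).1 := by
  intro L
  induction L with
  | nil => intro c k; simp
  | cons i t ih =>
    intro c k
    simp only [List.foldl_cons, pvStep]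
    refine le_trans ?_ (ih _ (k + 1))
    split <;> omega

theorem pvRange_len_pairwise : ∀ (n : Nat) (a : Int),
    (PySem.List.pyRange a (a + n) 1).length = n ∧
    (PySem.List.pyRange a (a + n) 1).Pairwise (· < ·) := by
  intro n
  induction n with
  | zero =>
    intro a
    simp
  | succ n ih =>
    intro a
    have hlt : a < a + ((n : Int) + 1) := by omega
    have hcast : (a : Int) + ((n + 1 : Nat) : Int) = a + ((n : Int) + 1) := by push_cast; ring
    have hend : a + ((n : Int) + 1) = (a + 1) + (n : Nat) := by ring
    have hcons : PySem.List.pyRange a (a + ((n + 1 : Nat) : Int)) 1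
        = a :: PySem.List.pyRange (a + 1) ((a + 1) + (n : Nat)) 1 := by
      rw [hcast, PySem.List.pyRange_one_cons hlt, hend]
    obtain ⟨ihl, ihp⟩ := ih (a + 1)
    constructor
    · rw [hcons]; simp [ihl]
    · rw [hcons]
      refine List.Pairwise.cons ?_ ihp
      intro y hy
      have := PySem.List.mem_pyRange_one.mp hy
      omega

-- A's inner loop adds no error exactly when the scanned list is k, k+1, …
theorem pvInner_eq_iff : ∀ (L : List Int) (c k : Int),
    (L.foldl pvStep (c, k)).1 = c ↔ L = PySem.List.pyRange k (k + L.length) 1 := by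
  intro L
  induction L with
  | nil =>
    intro c k
    simp
  | cons i t ih =>
    intro c k
    have hlt : k < k + ((i :: t : List Int).length : Int) := by
      simp only [List.length_cons]; push_cast; omega
    have hcons : PySem.List.pyRange k (k + ((i :: t : List Int).length : Int)) 1
        = k :: PySem.List.pyRange (k + 1) (k + ((i :: t : List Int).length : Int)) 1 :=
      PySem.List.pyRange_one_cons hlt
    have hend : k + ((i :: t : List Int).length : Int) = (k + 1) + (t.length : Int) := by
      simp only [List.length_cons]; push_cast; ring
    by_cases hik : i = k
    · subst hik
      simp only [List.foldl_cons, pvStep, if_neg (by simp : ¬ (i ≠ i)), hcons]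
      rw [ih c (i + 1)]; simp only [hend]
      exact ⟨fun h => congrArg (i :: ·) h, fun h => ((List.cons.injEq i t i _).mp h).2⟩
    · constructor
      · intro h
        exfalso
        have hm := pvInner_mono t (c + 1) (k + 1)
        simp only [List.foldl_cons, pvStep, if_pos hik] at h
        omega
      · intro h
        exfalso
        rw [hcons] at h
        exact hik (List.cons.injEq _ _ _ _ ▸ h).1

-- the per-row equivalence: zero new errors ↔ B's set test
theorem pvRow_iff (radek : List Int) (c : Int) :
    ((PySem.List.sorted radek (fun x => x) false).foldl pvStep (c, 1)).1 = c ↔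
    PySem.Set.equal (PySem.Set.ofList radek)
      (PySem.Set.ofList (PySem.List.pyRange 1 ((radek.length : Int) + 1) 1)) = true := by
  set R := PySem.List.pyRange 1 ((radek.length : Int) + 1) 1 with hR
  have hlen1 : (1 : Int) + ((PySem.List.sorted radek (fun x => x) false).length : Int)
      = (radek.length : Int) + 1 := by
    rw [PySem.List.length_sorted]; ring
  have hrlp := pvRange_len_pairwise radek.length 1
  have hRlen : R.length = radek.length := by
    rw [hR]; have := hrlp.1; rwa [show (1 : Int) + (radek.length : Int) = (radek.length : Int) + 1 by ring] at this
  have hRpw : R.Pairwise (· < ·) := by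
    rw [hR]; have := hrlp.2; rwa [show (1 : Int) + (radek.length : Int) = (radek.length : Int) + 1 by ring] at this
  have hRnd : R.Nodup := hRpw.imp (fun h => ne_of_lt h)
  rw [pvInner_eq_iff, hlen1, ← hR]
  constructor
  · intro hs
    rw [PySem.Set.equal_iff]
    intro x
    rw [PySem.Set.mem_ofList, PySem.Set.mem_ofList]
    have hperm : (PySem.List.sorted radek (fun x => x) false).Perm radek :=
      PySem.List.sorted_perm radek (fun x => x) false
    rw [← hperm.mem_iff, hs]
  · intro he
    have hmem : ∀ x : Int, x ∈ radek ↔ x ∈ R := by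
      intro x
      have := (PySem.Set.equal_iff _ _).mp he x
      rwa [PySem.Set.mem_ofList, PySem.Set.mem_ofList] at this
    have hsub : R ⊆ radek := fun x hx => (hmem x).mpr hx
    have hsp : R.Subperm radek := List.subperm_of_subset hRnd hsub
    have hperm : R.Perm radek := hsp.perm_of_length_le (by omega)
    exact PySem.List.sorted_eq_of_perm_of_pairwise_lt radek R (fun x => x) hperm hRpw

-- the row-loop body of A
def pvBody (c : Int) (radek : List Int) : Int :=
  ((PySem.List.sorted radek (fun x => x) false).foldl pvStep (c, 1)).1

theorem pvOuter_mono : ∀ (rows : List (List Int)) (c : Int), c ≤ rows.foldl pvBody c := by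
  intro rows
  induction rows with
  | nil => intro c; simp
  | cons r t ih =>
    intro c
    simp only [List.foldl_cons]
    exact le_trans (pvInner_mono _ c 1) (ih _)

theorem pvOuter_eq_iff : ∀ (rows : List (List Int)) (c : Int),
    rows.foldl pvBody c = c ↔
    rows.all (fun radek =>
      PySem.Set.equal (PySem.Set.ofList radek)
        (PySem.Set.ofList (PySem.List.pyRange 1 ((radek.length : Int) + 1) 1))) = true := by
  intro rows
  induction rows with
  | nil => intro c; simp
  | cons r t ih =>
    intro c
    simp only [List.foldl_cons, List.all_cons, Bool.and_eq_true]
    by_cases hr : pvBody c r = c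
    · rw [hr, ih c, ← pvRow_iff r c]
      exact ⟨fun h => ⟨hr, h⟩, fun h => h.2⟩
    · constructor
      · intro h
        exfalso
        have h1 := pvInner_mono (PySem.List.sorted r (fun x => x) false) c 1
        have h2 := pvOuter_mono t (pvBody c r)
        have : c < pvBody c r := lt_of_le_of_ne h1 (fun he => hr he.symm)
        omega
      · rintro ⟨he, -⟩
        exact absurd ((pvRow_iff r c).mpr he) hr

-- ===== VERDICT (by name: the statement is the Claim_ definition above) =====
theorem kontrola_radku_spec : Claim_equal_kontrola_radku := by
  intro reseni _
  unfold Spec_kontrola_radku kontrola_radku kontrola_radku_alt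
  have hfold : reseni.foldl (fun chyby radek =>
      let Radek := PySem.List.sorted radek (fun x => x) false
      (Radek.foldl (fun (st : Int × Int) i =>
          (if i ≠ st.2 then st.1 + 1 else st.1, st.2 + 1)) (chyby, 1)).1) 0
      = reseni.foldl pvBody 0 := rfl
  rw [hfold]
  have hmono := pvOuter_mono reseni 0
  have hiff := pvOuter_eq_iff reseni 0
  by_cases hz : List.foldl pvBody 0 reseni = 0
  · rw [hiff.mp hz]
    show (if List.foldl pvBody 0 reseni > 0 then false else true) = true
    rw [if_neg (by omega)]
  · have hpos : List.foldl pvBody 0 reseni > 0 := lt_of_le_of_ne hmono (Ne.symm hz)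
    have hall := Bool.eq_false_iff.mpr (fun h => hz (hiff.mpr h))
    rw [hall]
    show (if List.foldl pvBody 0 reseni > 0 then false else true) = false
    rw [if_pos hpos]
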